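-- pv_equiv track=rewrite | github.com/rainSax/CS325_400 | CS325_Portfolio/Palindrome.py | checkPalindrome_2
-- ===== SOURCE A (Python) =====
-- def checkPalindrome_2(string, k):
--     counts = {}
--     odd = 0
--     for letter in string:
--         if letter not in counts:
--             counts[letter] = 1
--         else:
--             counts[letter] += 1
--     for key, val in counts.items():
--         odd += val % 2
--     if odd <= (k + 1):
--         return True
--     else:
--         return False
-- ===== SOURCE B (Python) =====
-- def checkPalindrome_2(string, k):
--     odd = set()
--     for letter in string:
--         if letter in odd:
--             odd.discard(letter)
--         else:
--             odd.add(letter)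
--     return len(odd) <= k + 1
-- ===== Notes on version B (the rewrite author's own statement) =====
-- stated objective: idiomatic
-- what changed: A builds a full character-count dict in one pass and then sums val % 2 over the counts in a second loop; B makes a single pass maintaining only a parity set (toggle each letter in/out), so no counts are kept and the second loop disappears.
import Mathlib
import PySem

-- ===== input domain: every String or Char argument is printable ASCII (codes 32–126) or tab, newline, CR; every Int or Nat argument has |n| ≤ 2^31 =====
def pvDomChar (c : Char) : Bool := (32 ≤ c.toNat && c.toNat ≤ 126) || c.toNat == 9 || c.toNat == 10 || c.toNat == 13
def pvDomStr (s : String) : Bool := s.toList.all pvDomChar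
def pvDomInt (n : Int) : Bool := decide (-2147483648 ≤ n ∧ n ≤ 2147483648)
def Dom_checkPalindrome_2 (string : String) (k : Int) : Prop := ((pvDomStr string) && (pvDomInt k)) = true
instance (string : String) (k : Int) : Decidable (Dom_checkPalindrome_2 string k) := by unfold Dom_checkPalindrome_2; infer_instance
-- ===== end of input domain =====

-- B replaces A's counts-dict + second parity-summing loop by a single pass keeping only a
-- parity set (toggle each letter in/out); objective: more idiomatic, same O(n) cost.

-- ===== PORT A =====
def checkPalindrome_2 (string : String) (k : Int) : Bool :=
  let counts := string.toList.foldl (fun d letter =>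
    match d.get? letter with
    | none => d.insert letter (1 : Int)        -- letter not in counts: counts[letter] = 1
    | some v => d.insert letter (v + 1))       -- counts[letter] += 1
    PySem.Dict.empty
  let odd := counts.items.foldl (fun odd p => odd + PySem.Int.mod p.2 2) (0 : Int)
  if odd ≤ k + 1 then true else false

-- ===== PORT B =====
def checkPalindrome_2_alt (string : String) (k : Int) : Bool :=
  let odd := string.toList.foldl (fun s letter =>
    if PySem.Set.contains s letter then PySem.Set.discard s letter
    else PySem.Set.add s letter) PySem.Set.empty
  decide (PySem.Set.len odd ≤ k + 1)

-- ===== PRECONDITION & SPEC =====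
def Spec_checkPalindrome_2 (string : String) (k : Int) (out : Bool) : Prop := out = checkPalindrome_2_alt string k
instance (string : String) (k : Int) (out : Bool) : Decidable (Spec_checkPalindrome_2 string k out) := by unfold Spec_checkPalindrome_2; infer_instance

-- ===== CLAIM (what is proved, stated in full; the proofs are below) =====
def Claim_equal_checkPalindrome_2 : Prop := ∀ (string : String) (k : Int), Dom_checkPalindrome_2 string k → Spec_checkPalindrome_2 string k (checkPalindrome_2 string k)

-- ===== LEMMAS AND PROOFS =====

-- A's counting loop is exactly Counter(string): the two branches are both `insert letter (getD letter 0 + 1)`.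
theorem aCounts_eq_counter (l : List Char) :
    l.foldl (fun d letter =>
      match d.get? letter with
      | none => d.insert letter (1 : Int)
      | some v => d.insert letter (v + 1)) PySem.Dict.empty = PySem.Dict.counter l := by
  rw [← PySem.Dict.foldl_insert_getD_add_one_eq_counter]
  have hstep : (fun (d : PySem.Dict Char Int) letter =>
      match d.get? letter with
      | none => d.insert letter (1 : Int)
      | some v => d.insert letter (v + 1))
      = fun (d : PySem.Dict Char Int) x => d.insert x (d.getD x 0 + 1) := by
    funext d c
    unfold PySem.Dict.getD
    cases h : d.get? c <;> simp
  rw [hstep]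

-- B's toggle step
def pvStep (s : PySem.Set Char) (c : Char) : PySem.Set Char :=
  if PySem.Set.contains s c then PySem.Set.discard s c else PySem.Set.add s c

-- invariant: after processing l, the set is nodup and holds exactly the letters with odd count in l
def pvGood (s : PySem.Set Char) (l : List Char) : Prop :=
  s.Nodup ∧ ∀ c, c ∈ s ↔ l.count c % 2 = 1

theorem pvGood_step {s : PySem.Set Char} {l : List Char} (h : pvGood s l) (c : Char) :
    pvGood (pvStep s c) (l ++ [c]) := by
  obtain ⟨hnd, hm⟩ := h
  unfold pvStep
  by_cases hcm : c ∈ s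
  · rw [if_pos ((PySem.Set.contains_iff s c).2 hcm)]
    refine ⟨PySem.Set.nodup_discard s c hnd, fun x => ?_⟩
    rw [PySem.Set.mem_discard]
    by_cases hx : x = c
    · subst hx
      have := (hm x).1 hcm
      simp [List.count_append]
      omega
    · have hcx : ¬ c = x := fun h => hx h.symm
      simp [hm x, List.count_append, hcx, hx]
  · rw [if_neg (fun h => hcm ((PySem.Set.contains_iff s c).1 h))]
    refine ⟨PySem.Set.nodup_add s c hnd, fun x => ?_⟩
    rw [PySem.Set.mem_add]
    by_cases hx : x = c
    · subst hx
      have : ¬ (l.count x % 2 = 1) := fun h1 => hcm ((hm x).2 h1)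
      simp [List.count_append]
      omega
    · have hcx : ¬ c = x := fun h => hx h.symm
      simp [hm x, List.count_append, hcx, hx]

theorem pvGood_foldl (m : List Char) : ∀ (s : PySem.Set Char) (l : List Char),
    pvGood s l → pvGood (m.foldl pvStep s) (l ++ m) := by
  induction m with
  | nil => intro s l h; simpa using h
  | cons c m ih =>
    intro s l h
    have := ih (pvStep s c) (l ++ [c]) (pvGood_step h c)
    simpa using this

-- summing f x % 2 with f x ≥ 0 over a list counts the elements with odd f
theorem pvSum_mod_two (f : Char → Nat) (S : List Char) :
    (S.map (fun c => ((f c : Int)) % 2)).sum = ((S.filter (fun c => f c % 2 = 1)).length : Int) := by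
  induction S with
  | nil => simp
  | cons c S ih =>
    by_cases h : f c % 2 = 1 <;>
      simp [h, ih] <;> omega

-- ===== VERDICT (by name: the statement is the Claim_ definition above) =====
theorem checkPalindrome_2_spec : Claim_equal_checkPalindrome_2 := by
  intro string k _
  unfold Spec_checkPalindrome_2
  simp only [checkPalindrome_2, checkPalindrome_2_alt]
  set l := string.toList with hl
  rw [aCounts_eq_counter]
  rw [PySem.List.foldl_add (l := (PySem.Dict.counter l).items)]
  rw [PySem.Dict.items_counter]
  have hsum : (((PySem.Set.ofList l).map (fun k => (k, (l.count k : Int)))).map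
      (fun p => PySem.Int.mod p.2 2)).sum
      = (((PySem.Set.ofList l).filter (fun c => l.count c % 2 = 1)).length : Int) := by
    rw [List.map_map]
    have : ((fun p : Char × Int => PySem.Int.mod p.2 2) ∘ (fun k => (k, (l.count k : Int))))
        = fun c => ((l.count c : Int)) % 2 := by
      funext c
      simp
    rw [this, pvSum_mod_two]
  -- B's set
  have hgood : pvGood (l.foldl pvStep PySem.Set.empty) l := by
    have := pvGood_foldl l PySem.Set.empty [] ⟨List.nodup_nil, by simp⟩
    simpa using this
  obtain ⟨hnd, hm⟩ := hgood
  have hperm : ((PySem.Set.ofList l).filter (fun c => l.count c % 2 = 1)).Perm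
      (l.foldl pvStep PySem.Set.empty) := by
    rw [List.perm_ext_iff_of_nodup ((PySem.Set.nodup_ofList l).filter _) hnd]
    intro x
    rw [List.mem_filter, PySem.Set.mem_ofList, hm x]
    constructor
    · rintro ⟨-, h2⟩; simpa using h2
    · intro h2
      refine ⟨?_, by simpa using h2⟩
      have : l.count x % 2 = 1 := h2
      have : 0 < l.count x := by omega
      exact List.count_pos_iff.mp this
  have hlen : ((PySem.Set.ofList l).filter (fun c => l.count c % 2 = 1)).length
      = (l.foldl pvStep PySem.Set.empty).length := hperm.length_eq
  simp only [hsum, hlen]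
  have hfold : l.foldl (fun s letter =>
      if PySem.Set.contains s letter then PySem.Set.discard s letter
      else PySem.Set.add s letter) PySem.Set.empty = l.foldl pvStep PySem.Set.empty := rfl
  rw [hfold]
  simp [PySem.Set.len]
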